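-- pv_equiv track=rewrite | github.com/xiao2003/Labdetector | pc/desktop_app.py | _visible_backend_rows
-- ===== SOURCE A (Python) =====
-- from typing import Any, Callable, Dict, List
--
-- VISIBLE_BACKENDS: List[str] = ["ollama", "qwen", "deepseek", "kimi", "local_adapter"]
--
-- BACKEND_LABEL_OVERRIDES: Dict[str, str] = {
--     "ollama": "Ollama",
--     "local_adapter": "本地模型框架",
--     "qwen": "通义千问（需在模型配置页面添加 API Key）",
--     "deepseek": "DeepSeek（需在模型配置页面添加 API Key）",
--     "kimi": "Kimi（需在模型配置页面添加 API Key）",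
-- }
--
-- def _visible_backend_rows(rows: List[Dict[str, str]]) -> List[Dict[str, str]]:
--     by_backend: Dict[str, Dict[str, str]] = {}
--     for row in rows:
--         backend = str(row.get("value") or row.get("backend") or "")
--         if backend not in VISIBLE_BACKENDS:
--             continue
--         label = BACKEND_LABEL_OVERRIDES.get(backend, str(row.get("label") or backend))
--         normalized = dict(row)
--         normalized["label"] = label
--         by_backend[backend] = normalized
--     filtered: List[Dict[str, str]] = []
--     for backend in VISIBLE_BACKENDS:
--         row = by_backend.get(backend)
--         if row is not None:
--             filtered.append(row)
--     return filtered
-- ===== SOURCE B (Python) =====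
-- from typing import Dict, List
--
-- VISIBLE_BACKENDS: List[str] = ["ollama", "qwen", "deepseek", "kimi", "local_adapter"]
--
-- BACKEND_LABEL_OVERRIDES: Dict[str, str] = {
--     "ollama": "Ollama",
--     "local_adapter": "本地模型框架",
--     "qwen": "通义千问（需在模型配置页面添加 API Key）",
--     "deepseek": "DeepSeek（需在模型配置页面添加 API Key）",
--     "kimi": "Kimi（需在模型配置页面添加 API Key）",
-- }
--
-- def _visible_backend_rows(rows: List[Dict[str, str]]) -> List[Dict[str, str]]:
--     # No index dict: for each visible backend in order, scan rows and keep the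
--     # LAST row whose key matches (last write wins, as in A's dict overwrite).
--     result: List[Dict[str, str]] = []
--     for backend in VISIBLE_BACKENDS:
--         chosen = None
--         for row in rows:
--             if str(row.get("value") or row.get("backend") or "") == backend:
--                 chosen = row
--         if chosen is not None:
--             normalized = dict(chosen)
--             normalized["label"] = BACKEND_LABEL_OVERRIDES.get(
--                 backend, str(chosen.get("label") or backend)
--             )
--             result.append(normalized)
--     return result
-- ===== Notes on version B (the rewrite author's own statement) =====
-- stated objective: alternative
-- what changed: Replaces A's by_backend dict (one indexing pass plus an ordered read) with a direct per-backend scan: for each of the five visible backends, scan rows for the last matching row and normalize it, so no intermediate dict is built.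
import Mathlib
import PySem

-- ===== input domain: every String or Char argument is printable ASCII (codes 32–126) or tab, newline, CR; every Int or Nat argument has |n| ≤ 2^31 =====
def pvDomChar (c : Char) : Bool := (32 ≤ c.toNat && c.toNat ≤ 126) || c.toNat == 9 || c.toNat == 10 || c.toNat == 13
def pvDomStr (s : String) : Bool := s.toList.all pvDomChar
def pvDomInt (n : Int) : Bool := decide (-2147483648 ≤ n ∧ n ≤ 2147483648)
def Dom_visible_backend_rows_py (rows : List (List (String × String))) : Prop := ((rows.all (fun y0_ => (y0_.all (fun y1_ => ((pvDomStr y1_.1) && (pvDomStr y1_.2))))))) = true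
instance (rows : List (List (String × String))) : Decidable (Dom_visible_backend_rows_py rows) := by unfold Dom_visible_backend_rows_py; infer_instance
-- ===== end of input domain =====

-- B drops A's by_backend index dict: for each visible backend it scans rows for the
-- last matching row directly (alternative decomposition, same O(n) cost).


-- shared module-level constants of the Python file
def pvVisibleBackends : List String := ["ollama", "qwen", "deepseek", "kimi", "local_adapter"]

def pvOverrides : PySem.Dict String String := PySem.Dict.ofList
  [("ollama", "Ollama"),
   ("local_adapter", "本地模型框架"),
   ("qwen", "通义千问（需在模型配置页面添加 API Key）"),
   ("deepseek", "DeepSeek（需在模型配置页面添加 API Key）"),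
   ("kimi", "Kimi（需在模型配置页面添加 API Key）")]

-- str(row.get("value") or row.get("backend") or ""): `or` takes the first truthy
-- (non-None, non-empty) operand; str of a string is the string itself.
def pvRowKey (row : PySem.Dict String String) : String :=
  let v := (row.get? "value").getD ""
  if v ≠ "" then v else (row.get? "backend").getD ""

-- str(row.get("label") or backend)
def pvRowLabelDefault (row : PySem.Dict String String) (backend : String) : String :=
  let l := (row.get? "label").getD ""
  if l ≠ "" then l else backend

-- ===== PORT A =====
-- Each Python dict argument arrives as an association list; dict semantics via PySem.Dict.ofList.
def visible_backend_rows_py (rows : List (List (String × String))) : List (List (String × String)) :=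
  let by_backend : PySem.Dict String (PySem.Dict String String) :=
    rows.foldl (fun by_backend raw =>
      let row := PySem.Dict.ofList raw
      let backend := pvRowKey row
      if pvVisibleBackends.contains backend then
        let label := pvOverrides.getD backend (pvRowLabelDefault row backend)
        let normalized := row.insert "label" label
        by_backend.insert backend normalized
      else by_backend) PySem.Dict.empty
  (pvVisibleBackends.foldl (fun filtered backend =>
      match by_backend.get? backend with
      | some row => filtered ++ [row]
      | none => filtered) []).map PySem.Dict.items

-- ===== PORT B =====
-- last row of rows whose key equals backend (B's inner scan)
def pvLastMatch (rows : List (List (String × String))) (backend : String) :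
    Option (PySem.Dict String String) :=
  rows.foldl (fun chosen raw =>
    let row := PySem.Dict.ofList raw
    if pvRowKey row == backend then some row else chosen) none

def visible_backend_rows_py_alt (rows : List (List (String × String))) : List (List (String × String)) :=
  pvVisibleBackends.foldl (fun result backend =>
    match pvLastMatch rows backend with
    | some row =>
        result ++ [(row.insert "label"
          (pvOverrides.getD backend (pvRowLabelDefault row backend))).items]
    | none => result) []

-- ===== PRECONDITION & SPEC =====
def Spec_visible_backend_rows_py (rows : List (List (String × String))) (out : List (List (String × String))) : Prop := out = visible_backend_rows_py_alt rows
instance (rows : List (List (String × String))) (out : List (List (String × String))) : Decidable (Spec_visible_backend_rows_py rows out) := by unfold Spec_visible_backend_rows_py; infer_instance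

-- ===== CLAIM (what is proved, stated in full; the proofs are below) =====
def Claim_equal_visible_backend_rows_py : Prop := ∀ (rows : List (List (String × String))), Dom_visible_backend_rows_py rows → Spec_visible_backend_rows_py rows (visible_backend_rows_py rows)

-- ===== LEMMAS AND PROOFS =====

-- zeta-reduced views of the two loop bodies (definitional)
lemma pvLastMatch_eq (rows : List (List (String × String))) (backend : String) :
    pvLastMatch rows backend
    = rows.foldl (fun chosen raw =>
        if (pvRowKey (PySem.Dict.ofList raw) == backend) = true then some (PySem.Dict.ofList raw)
        else chosen) none := rfl

-- B's inner fold: a non-none seed only survives when no later row matches.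
lemma pvLastMatch_acc (rows : List (List (String × String))) (backend : String)
    (acc : Option (PySem.Dict String String)) :
    rows.foldl (fun chosen raw =>
      if (pvRowKey (PySem.Dict.ofList raw) == backend) = true then some (PySem.Dict.ofList raw)
      else chosen) acc
    = ((rows.foldl (fun chosen raw =>
        if (pvRowKey (PySem.Dict.ofList raw) == backend) = true then some (PySem.Dict.ofList raw)
        else chosen) none).elim acc some) := by
  induction rows generalizing acc with
  | nil => rfl
  | cons x xs ih =>
    simp only [List.foldl_cons]
    by_cases h : (pvRowKey (PySem.Dict.ofList x) == backend) = true
    · rw [if_pos h, if_pos h, ih (some (PySem.Dict.ofList x))]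
      cases xs.foldl (fun chosen raw =>
        if (pvRowKey (PySem.Dict.ofList raw) == backend) = true then some (PySem.Dict.ofList raw)
        else chosen) none <;> rfl
    · rw [if_neg h, if_neg h]
      exact ih acc

-- Key invariant: A's by_backend lookup at a visible backend equals B's last-match scan.
lemma pv_get_foldl (backend : String) (hb : pvVisibleBackends.contains backend = true)
    (rows : List (List (String × String))) (d : PySem.Dict String (PySem.Dict String String)) :
    (rows.foldl (fun by_backend raw =>
      if pvVisibleBackends.contains (pvRowKey (PySem.Dict.ofList raw)) then
        by_backend.insert (pvRowKey (PySem.Dict.ofList raw))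
          ((PySem.Dict.ofList raw).insert "label"
            (pvOverrides.getD (pvRowKey (PySem.Dict.ofList raw))
              (pvRowLabelDefault (PySem.Dict.ofList raw) (pvRowKey (PySem.Dict.ofList raw)))))
      else by_backend) d).get? backend
    = match pvLastMatch rows backend with
      | some row => some (row.insert "label"
          (pvOverrides.getD backend (pvRowLabelDefault row backend)))
      | none => d.get? backend := by
  induction rows generalizing d with
  | nil => rfl
  | cons x xs ih =>
    rw [List.foldl_cons, ih]
    have hlm : pvLastMatch (x :: xs) backend
        = (pvLastMatch xs backend).elim
            (if (pvRowKey (PySem.Dict.ofList x) == backend) = true then some (PySem.Dict.ofList x)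
             else none) some := by
      rw [pvLastMatch_eq, List.foldl_cons, pvLastMatch_acc, ← pvLastMatch_eq]
    rw [hlm]
    cases hxs : pvLastMatch xs backend with
    | some r => rfl
    | none =>
      simp only [Option.elim]
      by_cases hk : pvRowKey (PySem.Dict.ofList x) = backend
      · subst hk
        conv_lhs => rw [if_pos hb, PySem.Dict.get?_insert_self]
        conv_rhs => rw [if_pos (beq_self_eq_true _)]
      · conv_rhs => rw [if_neg (by simpa using hk : ¬((pvRowKey (PySem.Dict.ofList x) == backend) = true))]
        by_cases hv : pvVisibleBackends.contains (pvRowKey (PySem.Dict.ofList x)) = true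
        · conv_lhs => rw [if_pos hv, PySem.Dict.get?_insert_of_ne _ _ (Ne.symm hk)]
        · conv_lhs => rw [if_neg hv]

-- the outer read loops agree backend by backend
lemma pv_outer (rows : List (List (String × String)))
    (l : List String) (h : ∀ b ∈ l, pvVisibleBackends.contains b = true)
    (accA : List (PySem.Dict String String)) :
    (l.foldl (fun filtered backend =>
      match (rows.foldl (fun by_backend raw =>
        if pvVisibleBackends.contains (pvRowKey (PySem.Dict.ofList raw)) then
          by_backend.insert (pvRowKey (PySem.Dict.ofList raw))
            ((PySem.Dict.ofList raw).insert "label"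
              (pvOverrides.getD (pvRowKey (PySem.Dict.ofList raw))
                (pvRowLabelDefault (PySem.Dict.ofList raw) (pvRowKey (PySem.Dict.ofList raw)))))
        else by_backend) PySem.Dict.empty).get? backend with
      | some row => filtered ++ [row]
      | none => filtered) accA).map PySem.Dict.items
    = l.foldl (fun result backend =>
      match pvLastMatch rows backend with
      | some row =>
          result ++ [(row.insert "label"
            (pvOverrides.getD backend (pvRowLabelDefault row backend))).items]
      | none => result) (accA.map PySem.Dict.items) := by
  induction l generalizing accA with
  | nil => rfl
  | cons b bs ih =>
    simp only [List.foldl_cons]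
    rw [pv_get_foldl b (h b List.mem_cons_self) rows PySem.Dict.empty]
    cases hlm : pvLastMatch rows b with
    | some r =>
      have := ih (fun x hx => h x (List.mem_cons_of_mem _ hx))
        (accA ++ [r.insert "label" (pvOverrides.getD b (pvRowLabelDefault r b))])
      rw [this]
      simp [List.map_append]
    | none =>
      exact ih (fun x hx => h x (List.mem_cons_of_mem _ hx)) accA

-- ===== VERDICT (by name: the statement is the Claim_ definition above) =====
theorem visible_backend_rows_py_spec : Claim_equal_visible_backend_rows_py := by
  intro rows _
  show visible_backend_rows_py rows = visible_backend_rows_py_alt rows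
  unfold visible_backend_rows_py visible_backend_rows_py_alt
  exact pv_outer rows pvVisibleBackends (by decide) []
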